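-- pv_equiv track=rewrite | github.com/Fondamenti18/fondamenti-di-programmazione | students/1806064/homework03/program02.py | basso
-- ===== SOURCE A (Python) =====
-- def colora_quad(output,y,x,c):
--     for j in range(y,y+40):
--         for i in range(x,x+40):
--             output[j][i]=c
--     return output
--
-- def basso(y,x,matrice,altezza):
--     contapassi=""
--     y+=40
--     while y<altezza:
--         valore=matrice[y][x]
--         if valore!=(255,0,0) and valore!=(0,255,0):
--             matrice=colora_quad(matrice,y,x,(0,255,0))
--             contapassi+="1"
--             y+=40
--         else:
--             return y-40,x,matrice,contapassi
--     y-=40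
--     return y,x,matrice,contapassi
-- ===== SOURCE B (Python) =====
-- def basso(y, x, matrice, altezza):
--     # Pass 1: scan downward in steps of 40, counting free (non-red, non-green) cells.
--     steps = 0
--     yy = y + 40
--     while yy < altezza and matrice[yy][x] != (255, 0, 0) and matrice[yy][x] != (0, 255, 0):
--         steps += 1
--         yy += 40
--     # Pass 2: paint a 40x40 green block at each counted step position.
--     for k in range(steps):
--         r0 = y + 40 + 40 * k
--         for j in range(r0, r0 + 40):
--             row = matrice[j]
--             for i in range(x, x + 40):
--                 row[i] = (0, 255, 0)
--     return y + 40 * steps, x, matrice, "1" * steps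
-- ===== Notes on version B (the rewrite author's own statement) =====
-- stated objective: alternative
-- what changed: A interleaves guard-checking and painting in one walk down the grid; B first scans downward counting the free step positions, then paints the 40x40 green blocks and builds the step string from the count in a separate pass.
import Mathlib
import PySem

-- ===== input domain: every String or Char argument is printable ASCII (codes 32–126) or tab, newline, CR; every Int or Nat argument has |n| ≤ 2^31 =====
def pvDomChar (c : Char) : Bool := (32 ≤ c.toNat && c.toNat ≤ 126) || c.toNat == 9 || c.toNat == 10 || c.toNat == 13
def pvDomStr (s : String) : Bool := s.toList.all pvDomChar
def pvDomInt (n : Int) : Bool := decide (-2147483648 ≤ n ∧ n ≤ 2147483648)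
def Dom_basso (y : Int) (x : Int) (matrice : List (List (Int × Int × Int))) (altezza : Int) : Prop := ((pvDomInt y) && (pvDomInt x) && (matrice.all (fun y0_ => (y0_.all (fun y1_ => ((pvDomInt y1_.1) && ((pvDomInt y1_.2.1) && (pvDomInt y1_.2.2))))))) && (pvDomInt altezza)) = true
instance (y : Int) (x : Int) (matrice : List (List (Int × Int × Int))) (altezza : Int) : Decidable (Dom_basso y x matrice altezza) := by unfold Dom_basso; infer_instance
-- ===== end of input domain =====

-- B separates A's interleaved walk into a counting scan followed by a painting pass; equivalence is about
-- the RETURN value (A and B both mutate `matrice` in place in Python, producing the same final matrix).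

-- ===== PORT A =====
-- row[i] = c  (Python: negative index wraps; out of range raises — such inputs are outside Pre_, List.set is then a no-op)
def pySetCell (row : List (Int × Int × Int)) (i : Int) (c : Int × Int × Int) : List (Int × Int × Int) :=
  let i' := if i < 0 then i + (row.length : Int) else i
  if 0 ≤ i' then row.set i'.toNat c else row

-- m[j][i] = c  (same convention for j)
def pySetRow (m : List (List (Int × Int × Int))) (j : Int) (i : Int) (c : Int × Int × Int) : List (List (Int × Int × Int)) :=
  let j' := if j < 0 then j + (m.length : Int) else j
  if 0 ≤ j' then m.modify j'.toNat (fun row => pySetCell row i c) else m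

def colora_quad (output : List (List (Int × Int × Int))) (y x : Int) (c : Int × Int × Int) : List (List (Int × Int × Int)) :=
  (PySem.List.pyRange y (y + 40) 1).foldl (fun out j =>
    (PySem.List.pyRange x (x + 40) 1).foldl (fun o i => pySetRow o j i c) out) output

def bassoLoop (y x : Int) (matrice : List (List (Int × Int × Int))) (altezza : Int) (contapassi : String) :
    Int × Int × (List (List (Int × Int × Int))) × String :=
  if _h : y < altezza then
    match (PySem.List.pyGet? matrice y).bind (fun row => PySem.List.pyGet? row x) with
    | none => (y, x, matrice, contapassi)  -- Python raises IndexError here; outside Pre_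
    | some valore =>
      if valore ≠ (255, 0, 0) ∧ valore ≠ (0, 255, 0) then
        bassoLoop (y + 40) x (colora_quad matrice y x (0, 255, 0)) altezza (contapassi ++ "1")
      else
        (y - 40, x, matrice, contapassi)
  else
    (y - 40, x, matrice, contapassi)
termination_by (altezza - y).toNat
decreasing_by omega

def basso (y : Int) (x : Int) (matrice : List (List (Int × Int × Int))) (altezza : Int) : Int × Int × (List (List (Int × Int × Int))) × String :=
  bassoLoop (y + 40) x matrice altezza ""

-- ===== PORT B =====
-- Pass 1: count how many step positions are free (neither red nor green)
def scanSteps (yy x : Int) (m : List (List (Int × Int × Int))) (altezza : Int) : Nat :=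
  if _h : yy < altezza then
    match (PySem.List.pyGet? m yy).bind (fun row => PySem.List.pyGet? row x) with
    | none => 0  -- Python raises IndexError here; outside Pre_
    | some v =>
      if v ≠ (255, 0, 0) ∧ v ≠ (0, 255, 0) then scanSteps (yy + 40) x m altezza + 1 else 0
  else 0
termination_by (altezza - yy).toNat
decreasing_by omega

-- Pass 2: paint one 40×40 block green
def paintBlock (m : List (List (Int × Int × Int))) (r0 x : Int) : List (List (Int × Int × Int)) :=
  (PySem.List.pyRange r0 (r0 + 40) 1).foldl (fun o j =>
    (PySem.List.pyRange x (x + 40) 1).foldl (fun o2 i => pySetRow o2 j i (0, 255, 0)) o) m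

def basso_alt (y : Int) (x : Int) (matrice : List (List (Int × Int × Int))) (altezza : Int) : Int × Int × (List (List (Int × Int × Int))) × String :=
  let steps := scanSteps (y + 40) x matrice altezza
  let m' := (List.range steps).foldl (fun mm (k : Nat) => paintBlock mm (y + 40 + 40 * (k : Int)) x) matrice
  (y + 40 * (steps : Int), x, m', String.ofList (List.replicate steps '1'))

-- ===== PRECONDITION & SPEC =====
-- Pre_ excludes inputs where the downward traversal would index out of range (A raises IndexError) or
-- reach a negative index, where Python's wraparound makes A's mixed raise/return behaviour accidental.
def Pre_basso (y : Int) (x : Int) (matrice : List (List (Int × Int × Int))) (altezza : Int) : Prop :=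
  altezza ≤ y + 40 ∨
    (0 ≤ x ∧ 0 ≤ y + 40 ∧ altezza + 39 ≤ (matrice.length : Int) ∧
      ∀ r ∈ matrice, x + 40 ≤ (r.length : Int))
instance (y : Int) (x : Int) (matrice : List (List (Int × Int × Int))) (altezza : Int) : Decidable (Pre_basso y x matrice altezza) := by unfold Pre_basso; infer_instance

def pvWitness_basso : Int × Int × (List (List (Int × Int × Int))) × Int := (0, 0, [], 0)

-- instance search fails to assemble DecidableEq for this nested product; spelled out by hand
def pvDecEqOut : DecidableEq (Int × Int × (List (List (Int × Int × Int))) × String) :=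
  fun a b => @instDecidableEqProd _ _ _
    (fun c d => @instDecidableEqProd _ _ _
      (fun e f => @instDecidableEqProd _ _ (fun g h => instDecidableEqList g h)
        (fun i j => instDecidableEqString i j) e f) c d) a b

def Spec_basso (y : Int) (x : Int) (matrice : List (List (Int × Int × Int))) (altezza : Int) (out : Int × Int × (List (List (Int × Int × Int))) × String) : Prop := out = basso_alt y x matrice altezza
instance (y : Int) (x : Int) (matrice : List (List (Int × Int × Int))) (altezza : Int) (out : Int × Int × (List (List (Int × Int × Int))) × String) : Decidable (Spec_basso y x matrice altezza out) := by unfold Spec_basso; exact pvDecEqOut out (basso_alt y x matrice altezza)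

-- ===== CLAIM (what is proved, stated in full; the proofs are below) =====
def Claim_equal_basso : Prop := ∀ (y : Int) (x : Int) (matrice : List (List (Int × Int × Int))) (altezza : Int), Dom_basso y x matrice altezza → Pre_basso y x matrice altezza → Spec_basso y x matrice altezza (basso y x matrice altezza)

-- ===== LEMMAS AND PROOFS =====

theorem basso_witness_ok : Dom_basso pvWitness_basso.1 pvWitness_basso.2.1 pvWitness_basso.2.2.1 pvWitness_basso.2.2.2 ∧ Pre_basso pvWitness_basso.1 pvWitness_basso.2.1 pvWitness_basso.2.2.1 pvWitness_basso.2.2.2 := by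
  constructor <;> decide

-- generic foldl invariant
theorem foldl_pres {α β : Type} (P : β → Prop) (f : β → α → β) (l : List α) (b : β)
    (hb : P b) (hstep : ∀ b a, a ∈ l → P b → P (f b a)) : P (l.foldl f b) := by
  induction l generalizing b with
  | nil => exact hb
  | cons a l ih =>
    exact ih _ (hstep b a (by simp) hb) (fun b' a' ha' => hstep b' a' (by simp [ha']))

theorem foldl_funext {α β : Type} (f g : β → α → β) (l : List α) (b : β)
    (h : ∀ b a, f b a = g b a) : l.foldl f b = l.foldl g b := by
  induction l generalizing b with
  | nil => rfl
  | cons a l ih => rw [List.foldl_cons, List.foldl_cons, h, ih]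

theorem pySetCell_length (row : List (Int × Int × Int)) (i : Int) (c : Int × Int × Int) :
    (pySetCell row i c).length = row.length := by
  simp only [pySetCell]; split <;> split <;> simp

theorem pySetRow_map_length (m : List (List (Int × Int × Int))) (j i : Int) (c : Int × Int × Int) :
    (pySetRow m j i c).map List.length = m.map List.length := by
  simp only [pySetRow]
  split <;> split <;> try rfl
  all_goals
    apply List.ext_getElem?
    intro k
    cases h : m[k]? <;>
      simp [List.getElem?_map, List.getElem?_modify, h, apply_ite List.length, pySetCell_length]

theorem pySetRow_get_ne (m : List (List (Int × Int × Int))) (j i : Int) (c : Int × Int × Int)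
    (jq : Int) (hj : 0 ≤ j) (hjq : 0 ≤ jq) (hne : jq ≠ j) :
    PySem.List.pyGet? (pySetRow m j i c) jq = PySem.List.pyGet? m jq := by
  have hjj : ¬ j < 0 := by omega
  simp only [pySetRow, if_neg hjj, if_pos hj]
  rw [PySem.List.pyGet?_of_nonneg _ hjq, PySem.List.pyGet?_of_nonneg _ hjq]
  have hne2 : j.toNat ≠ jq.toNat := by omega
  simp [hne2]

-- the invariant preserved by painting one block at r0 with r0 + 40 ≤ lo
def PaintInv (m : List (List (Int × Int × Int))) (lo : Int) (m' : List (List (Int × Int × Int))) : Prop :=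
  m'.map List.length = m.map List.length ∧
    ∀ jq : Int, lo ≤ jq → PySem.List.pyGet? m' jq = PySem.List.pyGet? m jq

theorem paint_inv (m : List (List (Int × Int × Int))) (r0 x : Int) (c : Int × Int × Int) (lo : Int)
    (hr0 : 0 ≤ r0) (hlo : r0 + 40 ≤ lo) :
    PaintInv m lo ((PySem.List.pyRange r0 (r0 + 40) 1).foldl (fun out j =>
      (PySem.List.pyRange x (x + 40) 1).foldl (fun o i => pySetRow o j i c) out) m) := by
  apply foldl_pres
  · exact ⟨rfl, fun _ _ => rfl⟩
  · intro b j hj hb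
    have hjr : r0 ≤ j ∧ j < r0 + 40 := (PySem.List.mem_pyRange_one).mp hj
    apply foldl_pres _ _ _ _ hb
    intro b' i _ hb'
    refine ⟨by rw [pySetRow_map_length]; exact hb'.1, ?_⟩
    intro jq hjq
    rw [pySetRow_get_ne _ _ _ _ _ (by omega) (by omega) (by omega)]
    exact hb'.2 jq hjq

theorem colora_paint_inv (m : List (List (Int × Int × Int))) (r0 x : Int) (hr0 : 0 ≤ r0) :
    PaintInv m (r0 + 40) (colora_quad m r0 x (0, 255, 0)) := by
  exact paint_inv m r0 x _ (r0 + 40) hr0 (le_refl _)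

theorem paintBlock_eq_colora (m : List (List (Int × Int × Int))) (r0 x : Int) :
    paintBlock m r0 x = colora_quad m r0 x (0, 255, 0) := rfl

-- scanSteps only looks at rows ≥ yy
theorem scanSteps_congr (x altezza : Int) : ∀ (n : Nat) (yy : Int) (m1 m2 : List (List (Int × Int × Int))),
    (altezza - yy).toNat = n →
    (∀ jq : Int, yy ≤ jq → PySem.List.pyGet? m1 jq = PySem.List.pyGet? m2 jq) →
    scanSteps yy x m1 altezza = scanSteps yy x m2 altezza := by
  intro n
  induction n using Nat.strong_induction_on with
  | _ n ih =>
    intro yy m1 m2 hn hagree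
    unfold scanSteps
    split
    · rename_i hlt
      rw [hagree yy (le_refl _)]
      cases hv : (PySem.List.pyGet? m2 yy).bind (fun row => PySem.List.pyGet? row x) with
      | none => rfl
      | some v =>
        simp only
        split
        · rw [ih (altezza - (yy + 40)).toNat (by omega) (yy + 40) m1 m2 rfl
            (fun jq hjq => hagree jq (by omega))]
        · rfl
    · rfl

-- row-length invariant carried through the loop
def RowsOk (x : Int) (m : List (List (Int × Int × Int))) : Prop :=
  ∀ r ∈ m, x + 40 ≤ (r.length : Int)

theorem rowsOk_of_map_length (x : Int) (m m' : List (List (Int × Int × Int)))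
    (h : m'.map List.length = m.map List.length) (hm : RowsOk x m) : RowsOk x m' := by
  intro r hr
  have : r.length ∈ m'.map List.length := List.mem_map_of_mem hr
  rw [h] at this
  obtain ⟨r', hr', hlen⟩ := List.mem_map.mp this
  rw [← hlen]
  exact hm r' hr'

theorem length_of_map_length {m m' : List (List (Int × Int × Int))}
    (h : m'.map List.length = m.map List.length) : m'.length = m.length := by
  have := congrArg List.length h
  simpa using this

-- the successful read under the invariants
theorem read_some (m : List (List (Int × Int × Int))) (yy x altezza : Int)
    (hy0 : 0 ≤ yy) (hylt : yy < altezza) (hx : 0 ≤ x)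
    (hlen : altezza + 39 ≤ (m.length : Int)) (hrows : RowsOk x m) :
    ∃ v, (PySem.List.pyGet? m yy).bind (fun row => PySem.List.pyGet? row x) = some v := by
  have hyy : yy.toNat < m.length := by omega
  have h1 : PySem.List.pyGet? m yy = some m[yy.toNat] := by
    rw [PySem.List.pyGet?_of_nonneg _ hy0]
    simp [List.getElem?_eq_getElem hyy]
  have hmem : m[yy.toNat] ∈ m := List.getElem_mem _
  have hrl : x + 40 ≤ (m[yy.toNat].length : Int) := hrows _ hmem
  have hxx : x.toNat < m[yy.toNat].length := by omega
  refine ⟨m[yy.toNat][x.toNat], ?_⟩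
  rw [h1]
  simp only [Option.bind_some]
  rw [PySem.List.pyGet?_of_nonneg _ hx]
  simp [List.getElem?_eq_getElem hxx]

-- string step: cs ++ "1" ++ ones s = cs ++ ones (s+1)
theorem string_step (cs : String) (s : Nat) :
    (cs ++ "1") ++ String.ofList (List.replicate s '1') = cs ++ String.ofList (List.replicate (s + 1) '1') := by
  apply String.ext
  simp [List.replicate_succ]

-- main loop lemma
theorem loop_eq (x altezza : Int) (hx : 0 ≤ x) :
    ∀ (n : Nat) (yy : Int) (m : List (List (Int × Int × Int))) (cs : String),
    (altezza - yy).toNat = n → 0 ≤ yy →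
    altezza + 39 ≤ (m.length : Int) → RowsOk x m →
    bassoLoop yy x m altezza cs =
      (yy + 40 * (scanSteps yy x m altezza : Int) - 40, x,
        (List.range (scanSteps yy x m altezza)).foldl
          (fun mm (k : Nat) => paintBlock mm (yy + 40 * (k : Int)) x) m,
        cs ++ String.ofList (List.replicate (scanSteps yy x m altezza) '1')) := by
  intro n
  induction n using Nat.strong_induction_on with
  | _ n ih =>
    intro yy m cs hn hy0 hlen hrows
    by_cases hlt : yy < altezza
    · obtain ⟨v, hv⟩ := read_some m yy x altezza hy0 hlt hx hlen hrows
      rw [bassoLoop, dif_pos hlt, hv]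
      rw [scanSteps, dif_pos hlt, hv]
      by_cases hfree : v ≠ (255, 0, 0) ∧ v ≠ (0, 255, 0)
      · simp only [if_pos hfree]
        set m1 := colora_quad m yy x (0, 255, 0) with hm1
        have hpi : PaintInv m (yy + 40) m1 := colora_paint_inv m yy x hy0
        have hlen1 : altezza + 39 ≤ (m1.length : Int) := by
          rw [length_of_map_length hpi.1]; exact hlen
        have hrows1 : RowsOk x m1 := rowsOk_of_map_length x m m1 hpi.1 hrows
        have hrec := ih (altezza - (yy + 40)).toNat (by omega) (yy + 40) m1 (cs ++ "1")
          rfl (by omega) hlen1 hrows1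
        rw [hrec]
        have hscan : scanSteps (yy + 40) x m1 altezza = scanSteps (yy + 40) x m altezza :=
          scanSteps_congr x altezza _ (yy + 40) m1 m rfl
            (fun jq hjq => hpi.2 jq hjq)
        rw [hscan]
        set s := scanSteps (yy + 40) x m altezza with hs
        refine Prod.ext ?_ (Prod.ext rfl (Prod.ext ?_ ?_))
        · show yy + 40 + 40 * (s : Int) - 40 = yy + 40 * ((s + 1 : Nat) : Int) - 40
          push_cast; ring
        · show (List.range s).foldl (fun mm (k : Nat) => paintBlock mm (yy + 40 + 40 * (k : Int)) x) m1 =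
            (List.range (s + 1)).foldl (fun mm (k : Nat) => paintBlock mm (yy + 40 * (k : Int)) x) m
          rw [List.range_succ_eq_map, List.foldl_cons, List.foldl_map]
          have hbase : paintBlock m (yy + 40 * ((0 : Nat) : Int)) x = m1 := by
            rw [paintBlock_eq_colora, hm1]; norm_num
          rw [hbase]
          apply foldl_funext
          intro mm k
          have : yy + 40 + 40 * (k : Int) = yy + 40 * ((Nat.succ k : Nat) : Int) := by push_cast; ring
          rw [this]
        · exact string_step cs s
      · simp only [if_neg hfree]
        refine Prod.ext ?_ (Prod.ext rfl (Prod.ext ?_ ?_))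
        · show yy - 40 = yy + 40 * ((0 : Nat) : Int) - 40; push_cast; ring
        · rfl
        · show cs = cs ++ String.ofList (List.replicate 0 '1')
          apply String.ext; simp
    · rw [bassoLoop, dif_neg hlt, scanSteps, dif_neg hlt]
      refine Prod.ext ?_ (Prod.ext rfl (Prod.ext rfl ?_))
      · show yy - 40 = yy + 40 * ((0 : Nat) : Int) - 40; push_cast; ring
      · show cs = cs ++ String.ofList (List.replicate 0 '1')
        apply String.ext; simp

-- terminal case without the shape invariants
theorem trivial_case (y x altezza : Int) (m : List (List (Int × Int × Int)))
    (h : altezza ≤ y + 40) : basso y x m altezza = basso_alt y x m altezza := by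
  unfold basso basso_alt
  rw [bassoLoop, dif_neg (by omega), scanSteps, dif_neg (by omega)]
  refine Prod.ext ?_ (Prod.ext rfl (Prod.ext rfl ?_))
  · push_cast; ring
  · show "" = "" ++ String.ofList (List.replicate 0 '1')
    apply String.ext; simp

-- ===== VERDICT (by name: the statement is the Claim_ definition above) =====
theorem basso_spec : Claim_equal_basso := by
  intro y x m altezza _hdom hpre
  show basso y x m altezza = basso_alt y x m altezza
  rcases hpre with h | ⟨hx, hy, hlen, hrows⟩
  · exact trivial_case y x altezza m h
  · unfold basso basso_alt
    rw [loop_eq x altezza hx (altezza - (y + 40)).toNat (y + 40) m "" rfl hy hlen hrows]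
    refine Prod.ext ?_ (Prod.ext rfl (Prod.ext ?_ ?_))
    · push_cast; ring
    · rfl
    · apply String.ext; simp
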